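-- pv_equiv track=rewrite | github.com/FlorianRamakers123/Inverse-General-Game-Playing | utils/tokenlib.py | fix_not_ilasp
-- ===== SOURCE A (Python) =====
-- def fix_not_ilasp(hyp):
--     lines = hyp.split("\n")
--     for j in range(len(lines)):
--         if ":-" in lines[j]:
--             parts = lines[j].split(":-")
--             body = parts[1].strip()
--             body_tokens = tokenize_prolog_body(body)
--             for i in range(len(body_tokens)):
--                 if body_tokens[i].startswith("not "):
--                     body_tokens[i] = body_tokens[i].replace("not ", "not(") + ")"
--             lines[j] = parts[0].strip() + " :- " + ", ".join(body_tokens)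
--     return "\n".join(lines)
--
-- def tokenize_prolog_body(prolog_body):
--     # the list of tokens that will be filled
--     tokens = []
--
--     # the amount of closed parentheses we need to parse in order to have matched parentheses
--     p_level = 0
--
--     # the current token
--     current_token = ""
--
--     # loop through each character of the body
--     for c in prolog_body:
--         # if we encounter a space than the current_token should be added, if not empty
--         if c == ',' and p_level == 0:
--             if current_token != "":
--                 tokens.append(current_token.strip())
--                 current_token = ""
--             continue
--         # increase level of parentheses
--         elif c == '(':
--             p_level += 1
--         # decrease level of parentheses
--         elif c == ')':
--             p_level -= 1
--         # delete spaces on level 0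
--         #elif c == ' ' and p_level == 0:
--         #    continue
--         # add the character to the current token
--         current_token += c
--
--     if current_token != "":
--         tokens.append(current_token.strip())
--     return tokens
-- ===== SOURCE B (Python) =====
-- def _fix_token(tok):
--     if tok.startswith("not "):
--         return tok.replace("not ", "not(") + ")"
--     return tok
--
-- def fix_not_ilasp(hyp):
--     fixed = []
--     for line in hyp.split("\n"):
--         if ":-" not in line:
--             fixed.append(line)
--             continue
--         parts = line.split(":-")
--         # split the body on EVERY comma, then re-merge pieces whose running
--         # parenthesis balance is nonzero (those commas were nested)
--         pieces = parts[1].strip().split(",")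
--         tokens = []
--         buf = pieces[0]
--         bal = buf.count("(") - buf.count(")")
--         for piece in pieces[1:]:
--             if bal == 0:
--                 if buf != "":
--                     tokens.append(_fix_token(buf.strip()))
--                 buf = piece
--                 bal = piece.count("(") - piece.count(")")
--             else:
--                 buf = buf + "," + piece
--                 bal += piece.count("(") - piece.count(")")
--         if buf != "":
--             tokens.append(_fix_token(buf.strip()))
--         fixed.append(parts[0].strip() + " :- " + ", ".join(tokens))
--     return "\n".join(fixed)
-- ===== Notes on version B (the rewrite author's own statement) =====
-- stated objective: alternative
-- what changed: Instead of A's character-by-character scan with a parenthesis-depth counter, B splits each clause body on every comma and then re-merges adjacent pieces whose running open-minus-close parenthesis count is nonzero, wrapping negation tokens as they are finalized.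
import Mathlib
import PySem

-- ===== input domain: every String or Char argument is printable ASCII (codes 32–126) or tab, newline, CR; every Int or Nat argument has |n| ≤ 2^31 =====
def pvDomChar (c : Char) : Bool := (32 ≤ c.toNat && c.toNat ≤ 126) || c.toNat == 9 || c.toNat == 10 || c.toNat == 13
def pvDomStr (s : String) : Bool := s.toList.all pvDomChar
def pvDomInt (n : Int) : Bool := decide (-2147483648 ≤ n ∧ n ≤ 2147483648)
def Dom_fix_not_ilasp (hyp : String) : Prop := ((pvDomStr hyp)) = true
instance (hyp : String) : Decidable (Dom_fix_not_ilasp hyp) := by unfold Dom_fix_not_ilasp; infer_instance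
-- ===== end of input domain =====

-- B replaces A's character-by-character depth-counting tokenizer of each clause body by
-- split-on-every-comma followed by re-merging pieces whose parenthesis-count balance is
-- nonzero (alternative decomposition, same output).

-- ===== PORT A =====
-- helper tokenize_prolog_body: the loop body over one character (state: tokens, p_level, current_token)
def pvTokStep (st : List (List Char) × Int × List Char) (c : Char) :
    List (List Char) × Int × List Char :=
  if c = ',' ∧ st.2.1 = 0 then
    if st.2.2 ≠ [] then (st.1 ++ [PySem.Chars.strip st.2.2], st.2.1, []) else st
  else
    (st.1,
     (if c = '(' then st.2.1 + 1 else if c = ')' then st.2.1 - 1 else st.2.1),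
     st.2.2 ++ [c])

def tokenize_prolog_body (body : List Char) : List (List Char) :=
  let st := body.foldl pvTokStep ([], 0, [])
  if st.2.2 ≠ [] then st.1 ++ [PySem.Chars.strip st.2.2] else st.1

-- wrap a token starting with "not " (A's second loop over body_tokens applies this to each token;
-- B's helper _fix_token is the same computation applied at append time)
def pvFixTok (t : List Char) : List Char :=
  if PySem.Chars.startswith t "not ".toList then
    PySem.Chars.replace t "not ".toList "not(".toList ++ [')']
  else t

-- A's loop body for one line
def pvFixLineA (line : List Char) : List Char :=
  if PySem.Chars.isIn ":-".toList line then
    PySem.Chars.strip (PySem.List.pyGetD (PySem.Chars.splitOn line ":-".toList) 0 []) ++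
      " :- ".toList ++
      PySem.Chars.join ", ".toList
        ((tokenize_prolog_body
            (PySem.Chars.strip (PySem.List.pyGetD (PySem.Chars.splitOn line ":-".toList) 1 []))).map
          pvFixTok)
  else line

def fix_not_ilasp (hyp : String) : String :=
  String.ofList (PySem.Chars.join ['\n']
    ((PySem.Chars.splitOn hyp.toList ['\n']).map pvFixLineA))

-- ===== PORT B =====
-- piece.count("(") - piece.count(")")
def pvBal (cs : List Char) : Int :=
  (PySem.Chars.count cs ['('] : Int) - (PySem.Chars.count cs [')'] : Int)

-- Source B's merge loop body over one piece (state: tokens, buf, bal)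
def pvMergeStep (st : List (List Char) × List Char × Int) (piece : List Char) :
    List (List Char) × List Char × Int :=
  if st.2.2 = 0 then
    (if st.2.1 ≠ [] then st.1 ++ [pvFixTok (PySem.Chars.strip st.2.1)] else st.1,
     piece, pvBal piece)
  else
    (st.1, st.2.1 ++ [','] ++ piece, st.2.2 + pvBal piece)

-- Source B's body pipeline: split on every comma, merge by balance, final flush, join
def pvBodyB (body : List Char) : List Char :=
  let pieces := PySem.Chars.splitOn body [',']
  let buf0 := PySem.List.pyGetD pieces 0 []
  let st := (pieces.drop 1).foldl pvMergeStep ([], buf0, pvBal buf0)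
  PySem.Chars.join ", ".toList
    (if st.2.1 ≠ [] then st.1 ++ [pvFixTok (PySem.Chars.strip st.2.1)] else st.1)

-- Source B's loop body for one line
def pvFixLineB (line : List Char) : List Char :=
  if PySem.Chars.isIn ":-".toList line then
    PySem.Chars.strip (PySem.List.pyGetD (PySem.Chars.splitOn line ":-".toList) 0 []) ++
      " :- ".toList ++
      pvBodyB (PySem.Chars.strip (PySem.List.pyGetD (PySem.Chars.splitOn line ":-".toList) 1 []))
  else line

def fix_not_ilasp_alt (hyp : String) : String :=
  String.ofList (PySem.Chars.join ['\n']
    ((PySem.Chars.splitOn hyp.toList ['\n']).map pvFixLineB))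

-- ===== PRECONDITION & SPEC =====
def Spec_fix_not_ilasp (hyp : String) (out : String) : Prop := out = fix_not_ilasp_alt hyp
instance (hyp : String) (out : String) : Decidable (Spec_fix_not_ilasp hyp out) := by unfold Spec_fix_not_ilasp; infer_instance

-- ===== CLAIM (what is proved, stated in full; the proofs are below) =====
def Claim_equal_fix_not_ilasp : Prop := ∀ (hyp : String), Dom_fix_not_ilasp hyp → Spec_fix_not_ilasp hyp (fix_not_ilasp hyp)

-- ===== LEMMAS AND PROOFS =====

-- reference single-char splitter: pvSplitC c pre l = the pieces of pre ++ l split on c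
def pvSplitC (c : Char) (pre l : List Char) : List (List Char) :=
  match l with
  | [] => [pre]
  | x :: rest => if x = c then pre :: pvSplitC c [] rest else pvSplitC c (pre ++ [x]) rest

theorem pvSplitC_ne_nil (c : Char) (pre l : List Char) : pvSplitC c pre l ≠ [] := by
  induction l generalizing pre with
  | nil => simp [pvSplitC]
  | cons x rest ih =>
    by_cases h : x = c
    · simp [pvSplitC, h]
    · simpa [pvSplitC, h] using ih (pre ++ [x])

theorem pvSplitC_pre (c : Char) (pre l : List Char) :
    pvSplitC c pre l = (pre ++ (pvSplitC c [] l).headI) :: (pvSplitC c [] l).tail := by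
  induction l generalizing pre with
  | nil => simp [pvSplitC]
  | cons x rest ih =>
    by_cases h : x = c
    · simp [pvSplitC, h]
    · rw [pvSplitC, if_neg h, ih (pre ++ [x]),
        show pvSplitC c [] (x :: rest) = pvSplitC c ([] ++ [x]) rest by simp [pvSplitC, h],
        ih ([] ++ [x])]
      simp

theorem pv_count_go_spec (c : Char) (fuel : Nat) (l : List Char) (acc : Nat)
    (h : l.length ≤ fuel) :
    PySem.Chars.count.go [c] fuel l acc = acc + l.count c := by
  induction fuel generalizing l acc with
  | zero =>
    interval_cases hl : l.length
    rw [List.length_eq_zero_iff] at hl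
    subst hl
    simp [PySem.Chars.count.go]
  | succ fuel ih =>
    cases l with
    | nil => simp [PySem.Chars.count.go]
    | cons x rest =>
      by_cases hx : x = c
      · rw [PySem.Chars.count.go, if_pos (by simp [hx, List.isPrefixOf])]
        simp only [List.length_singleton, List.drop_one, List.tail_cons]
        rw [ih rest (acc + 1) (by simpa using Nat.le_of_succ_le_succ h)]
        simp [hx]
        omega
      · rw [PySem.Chars.count.go, if_neg (by simp [List.isPrefixOf]; exact fun hh => hx hh.symm)]
        rw [ih rest acc (by simpa using Nat.le_of_succ_le_succ h)]
        simp [hx]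

theorem pv_count_single (l : List Char) (c : Char) :
    PySem.Chars.count l [c] = l.count c := by
  rw [PySem.Chars.count, if_neg (by simp)]
  simpa using pv_count_go_spec c l.length l 0 (le_refl _)

theorem pv_splitOn_go_spec (c : Char) (fuel : Nat) (l cur : List Char)
    (acc : List (List Char)) (h : l.length < fuel) :
    PySem.Chars.splitOn.go [c] fuel l cur acc = acc.reverse ++ pvSplitC c cur.reverse l := by
  induction fuel generalizing l cur acc with
  | zero => omega
  | succ fuel ih =>
    cases l with
    | nil => simp [PySem.Chars.splitOn.go, pvSplitC]
    | cons x rest =>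
      by_cases hx : x = c
      · rw [PySem.Chars.splitOn.go, if_pos (by simp [hx, List.isPrefixOf])]
        simp only [List.length_singleton, List.drop_one, List.tail_cons]
        rw [ih rest [] (cur.reverse :: acc) (by simpa using Nat.lt_of_succ_lt_succ h)]
        simp [pvSplitC, hx]
      · rw [PySem.Chars.splitOn.go, if_neg (by simp [List.isPrefixOf]; exact fun hh => hx hh.symm)]
        rw [ih rest (x :: cur) acc (by simpa using Nat.lt_of_succ_lt_succ h)]
        simp [pvSplitC, hx]

theorem pv_splitOn_single (l : List Char) (c : Char) :
    PySem.Chars.splitOn l [c] = pvSplitC c [] l := by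
  rw [PySem.Chars.splitOn]
  simpa using pv_splitOn_go_spec c (l.length + 1) l [] [] (by omega)

theorem pvBal_append (a b : List Char) : pvBal (a ++ b) = pvBal a + pvBal b := by
  simp only [pvBal, pv_count_single, List.count_append]
  push_cast
  ring

theorem pvBal_nil : pvBal [] = 0 := by simp [pvBal, pv_count_single]

-- one character's contribution to the balance is A's p_level delta
theorem pvBal_single (x : Char) :
    pvBal [x] = (if x = '(' then (1 : Int) else if x = ')' then -1 else 0) := by
  simp only [pvBal, pv_count_single, List.count_singleton']
  split_ifs with h1 h2 <;> simp_all

-- B's state mirrors A's state: tokens fixed eagerly, buf = current_token, bal = p_level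
def pvMirrorB (st : List (List Char) × Int × List Char) :
    List (List Char) × List Char × Int :=
  (st.1.map pvFixTok, st.2.2, st.2.1)

-- the crux: B's merge fold over the comma pieces equals A's char fold
theorem pv_main (l : List Char) (toksA : List (List Char)) (cur : List Char) :
    (pvSplitC ',' cur l).tail.foldl pvMergeStep
      (toksA.map pvFixTok, (pvSplitC ',' cur l).headI, pvBal ((pvSplitC ',' cur l).headI))
    = pvMirrorB (l.foldl pvTokStep (toksA, pvBal cur, cur)) := by
  induction l generalizing toksA cur with
  | nil => simp [pvSplitC, pvMirrorB]
  | cons x rest ih =>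
    by_cases hx : x = ','
    · subst hx
      rw [show pvSplitC ',' cur (',' :: rest) = cur :: pvSplitC ',' [] rest by
            simp [pvSplitC]]
      simp only [List.tail_cons, List.headI_cons]
      rcases he : pvSplitC ',' [] rest with _ | ⟨h, t⟩
      · exact absurd he (pvSplitC_ne_nil ',' [] rest)
      · by_cases hb : pvBal cur = 0
        · rw [List.foldl_cons, show pvMergeStep (toksA.map pvFixTok, cur, pvBal cur) h
                = ((if cur ≠ [] then toksA ++ [PySem.Chars.strip cur] else toksA).map pvFixTok,
                   h, pvBal h) by
              by_cases hc : cur = [] <;> simp [pvMergeStep, hb, hc, pvBal_nil]]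
          have := ih (if cur ≠ [] then toksA ++ [PySem.Chars.strip cur] else toksA) []
          rw [he] at this
          simp only [List.headI_cons, List.tail_cons, pvBal_nil] at this
          rw [this, List.foldl_cons,
            show pvTokStep (toksA, pvBal cur, cur) ','
              = (if cur ≠ [] then toksA ++ [PySem.Chars.strip cur] else toksA, 0, []) by
                by_cases hc : cur = [] <;> simp [pvTokStep, hb, hc, pvBal_nil]]
        · have hpre := pvSplitC_pre ',' (cur ++ [',']) rest
          rw [he] at hpre
          simp only [List.headI_cons, List.tail_cons] at hpre
          have := ih toksA (cur ++ [','])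
          rw [hpre] at this
          simp only [List.headI_cons, List.tail_cons] at this
          rw [List.foldl_cons,
            show pvMergeStep (toksA.map pvFixTok, cur, pvBal cur) h
              = (toksA.map pvFixTok, cur ++ [','] ++ h, pvBal (cur ++ [','] ++ h)) by
                simp only [pvMergeStep, hb, if_false]
                rw [show cur ++ [','] ++ h = (cur ++ [',']) ++ h by simp,
                  pvBal_append, pvBal_append, show pvBal [','] = (0:Int) by decide]
                ring_nf]
          rw [show cur ++ [','] ++ h = (cur ++ [',']) ++ h by simp, this, List.foldl_cons,
            show pvTokStep (toksA, pvBal cur, cur) ','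
              = (toksA, pvBal (cur ++ [',']), cur ++ [',']) by
                simp [pvTokStep, hb, pvBal_append, pvBal_single]]
    · rw [show pvSplitC ',' cur (x :: rest) = pvSplitC ',' (cur ++ [x]) rest by
            simp [pvSplitC, hx]]
      rw [ih toksA (cur ++ [x]), List.foldl_cons,
        show pvTokStep (toksA, pvBal cur, cur) x = (toksA, pvBal (cur ++ [x]), cur ++ [x]) by
          simp [pvTokStep, hx, pvBal_append, pvBal_single]
          split_ifs <;> ring]

-- B's body pipeline equals A's tokenize + fix + join
theorem pv_body_eq (body : List Char) :
    pvBodyB body =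
      PySem.Chars.join ", ".toList ((tokenize_prolog_body body).map pvFixTok) := by
  unfold pvBodyB
  rw [pv_splitOn_single]
  rcases he : pvSplitC ',' [] body with _ | ⟨h, t⟩
  · exact absurd he (pvSplitC_ne_nil ',' [] body)
  · have := pv_main body [] []
    rw [he] at this
    simp only [List.map_nil, List.headI_cons, List.tail_cons, pvBal_nil] at this
    simp only [PySem.List.pyGetD, List.drop_one, List.tail_cons]
    norm_num
    rw [this]
    rcases hst : body.foldl pvTokStep ([], 0, []) with ⟨toks, p, cur⟩
    by_cases hcur : cur = []
    · simp [tokenize_prolog_body, hst, pvMirrorB, hcur]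
    · simp only [tokenize_prolog_body, hst, pvMirrorB, hcur, ne_eq, not_false_iff, if_pos]
      simp

theorem pv_line_eq (line : List Char) : pvFixLineB line = pvFixLineA line := by
  unfold pvFixLineB pvFixLineA
  by_cases h : PySem.Chars.isIn ":-".toList line = true
  · rw [if_pos h, if_pos h, pv_body_eq]
  · simp only [if_neg h]

-- ===== VERDICT (by name: the statement is the Claim_ definition above) =====
theorem fix_not_ilasp_spec : Claim_equal_fix_not_ilasp := by
  intro hyp _
  unfold Spec_fix_not_ilasp fix_not_ilasp fix_not_ilasp_alt
  rw [funext pv_line_eq]
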